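-- pv_equiv track=rewrite | github.com/ESPR3SS0/ripkit | run_ghidra_function.py | parse_for_functions
-- ===== SOURCE A (Python) =====
-- def parse_for_functions(inp):
--     res = []
--     in_list = False
--     for line in inp.split("\n"):
--         if "END FUNCTION LIST" in line:
--             return res
--         if in_list:
--             # Clean the line:
--             #  ('func_name', 0x555)
--             res.append(line.strip().replace('(','').replace(')','').split(','))
--         if "BEGIN FUNCTION LIST" in line:
--             in_list = True
--
--
--     return res
-- ===== SOURCE B (Python) =====
-- def parse_for_functions(inp):
--     lines = inp.split("\n")
--     end_idx = next((i for i, l in enumerate(lines) if "END FUNCTION LIST" in l),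
--                    len(lines))
--     region = lines[:end_idx]
--     begin_idx = next((i for i, l in enumerate(region) if "BEGIN FUNCTION LIST" in l),
--                      None)
--     if begin_idx is None:
--         return []
--     return [l.strip().replace('(', '').replace(')', '').split(',')
--             for l in region[begin_idx + 1:]]
-- ===== Notes on version B (the rewrite author's own statement) =====
-- stated objective: alternative
-- what changed: Replaces the stateful in_list flag loop with explicit marker location: find the first END line, then the first BEGIN line before it, and map the clean/split transform over the slice between them.
import Mathlib
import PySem

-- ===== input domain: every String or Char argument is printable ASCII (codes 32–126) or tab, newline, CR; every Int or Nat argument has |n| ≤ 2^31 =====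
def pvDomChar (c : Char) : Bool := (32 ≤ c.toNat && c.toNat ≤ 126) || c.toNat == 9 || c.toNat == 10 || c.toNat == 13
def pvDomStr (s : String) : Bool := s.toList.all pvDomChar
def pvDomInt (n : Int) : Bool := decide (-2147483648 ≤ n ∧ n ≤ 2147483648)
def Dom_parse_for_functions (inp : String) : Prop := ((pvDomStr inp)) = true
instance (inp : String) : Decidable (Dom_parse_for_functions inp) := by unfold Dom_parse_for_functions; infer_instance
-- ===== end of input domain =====

-- B replaces A's stateful in_list flag loop by locating the END and BEGIN markers
-- explicitly and mapping the clean/split transform over the slice between them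
-- (objective: alternative decomposition, same cost).

-- shared helpers (the identical Python subexpressions of both versions)
def pvIsEnd (line : String) : Bool := PySem.Str.isIn "END FUNCTION LIST" line
def pvIsBegin (line : String) : Bool := PySem.Str.isIn "BEGIN FUNCTION LIST" line
-- line.strip().replace('(','').replace(')','').split(',')
def pvClean (line : String) : List String :=
  (PySem.Str.split? (PySem.Str.replace (PySem.Str.replace (PySem.Str.strip line) "(" "") ")" "") ",").getD []

-- ===== PORT A =====
-- the for-loop with early return, state (res, in_list)
def pvLoopA : List String → List (List String) → Bool → List (List String)
  | [], res, _ => res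
  | line :: rest, res, inl =>
    if pvIsEnd line then res
    else
      pvLoopA rest (if inl then res ++ [pvClean line] else res)
        (if pvIsBegin line then true else inl)

def parse_for_functions (inp : String) : List (List String) :=
  pvLoopA ((PySem.Str.split? inp "\n").getD []) [] false

-- ===== PORT B =====
def parse_for_functions_alt (inp : String) : List (List String) :=
  let lines := (PySem.Str.split? inp "\n").getD []
  let end_idx := (lines.findIdx? pvIsEnd).getD lines.length
  let region := lines.take end_idx
  match region.findIdx? pvIsBegin with
  | none => []
  | some b => (region.drop (b + 1)).map pvClean

-- ===== PRECONDITION & SPEC =====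
def Spec_parse_for_functions (inp : String) (out : List (List String)) : Prop := out = parse_for_functions_alt inp
instance (inp : String) (out : List (List String)) : Decidable (Spec_parse_for_functions inp out) := by unfold Spec_parse_for_functions; infer_instance

-- ===== CLAIM (what is proved, stated in full; the proofs are below) =====
def Claim_equal_parse_for_functions : Prop := ∀ (inp : String), Dom_parse_for_functions inp → Spec_parse_for_functions inp (parse_for_functions inp)

-- ===== LEMMAS AND PROOFS =====

-- B's body applied to an arbitrary list of lines (proof helper)
def pvAltCore (ls : List String) : List (List String) :=
  let region := ls.take ((ls.findIdx? pvIsEnd).getD ls.length)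
  match region.findIdx? pvIsBegin with
  | none => []
  | some b => (region.drop (b + 1)).map pvClean

lemma pvTake_endIdx (ls : List String) :
    ls.take ((ls.findIdx? pvIsEnd).getD ls.length) = ls.takeWhile (fun l => !pvIsEnd l) := by
  induction ls with
  | nil => simp
  | cons l t ih =>
    by_cases h : pvIsEnd l = true
    · simp [List.findIdx?_cons, h, List.takeWhile]
    · simp only [List.findIdx?_cons, h, List.takeWhile] at *
      cases hf : t.findIdx? pvIsEnd with
      | none => simpa [hf, h] using ih
      | some b => simpa [hf, h] using ih

lemma pvLoopA_true (ls : List String) (res : List (List String)) :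
    pvLoopA ls res true = res ++ (ls.takeWhile (fun l => !pvIsEnd l)).map pvClean := by
  induction ls generalizing res with
  | nil => simp [pvLoopA]
  | cons l t ih =>
    by_cases h : pvIsEnd l = true
    · simp [pvLoopA, h, List.takeWhile]
    · simp [pvLoopA, h, List.takeWhile, ih]

lemma pvLoopA_false (ls : List String) (res : List (List String)) :
    pvLoopA ls res false = res ++ pvAltCore ls := by
  induction ls generalizing res with
  | nil => simp [pvLoopA, pvAltCore]
  | cons l t ih =>
    by_cases hE : pvIsEnd l = true
    · simp [pvLoopA, hE, pvAltCore, List.findIdx?_cons]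
    · by_cases hB : pvIsBegin l = true
      · rw [pvLoopA]
        simp only [hE, hB, if_true, pvLoopA_true]
        simp [pvAltCore, List.findIdx?_cons, hE, hB, pvTake_endIdx]
      · rw [pvLoopA]
        simp only [hE, if_false, hB, Bool.false_eq_true, if_false, ih]
        congr 1
        cases hf : (t.take ((t.findIdx? pvIsEnd).getD t.length)).findIdx? pvIsBegin with
        | none => simp [pvAltCore, List.findIdx?_cons, hE, hB, hf]
        | some b => simp [pvAltCore, List.findIdx?_cons, hE, hB, hf]

-- ===== VERDICT (by name: the statement is the Claim_ definition above) =====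
theorem parse_for_functions_spec : Claim_equal_parse_for_functions := by
  intro inp _
  unfold Spec_parse_for_functions parse_for_functions parse_for_functions_alt
  rw [pvLoopA_false]
  simp [pvAltCore]
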